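-- pv_equiv track=rewrite | github.com/alswo1212/jungle_baekjoon | 백준/Silver/3085. 사탕 게임/사탕 게임.py | check_ver
-- ===== SOURCE A (Python) =====
-- def check_ver(board:list[str], x:int)->int:
--     cnt, temp = 0, 0
--     c = board[0][x]
--     for i in range(len(board)):
--         if c == board[i][x]:
--             temp += 1
--         else:
--             c = board[i][x]
--             temp = 1
--         if temp > cnt:
--             cnt = temp
--     return cnt
-- ===== SOURCE B (Python) =====
-- def check_ver(board: list[str], x: int) -> int:
--     col = [row[x] for row in board]
--     best = 0
--     rest = col
--     while rest:
--         c = rest[0]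
--         k = 1
--         while k < len(rest) and rest[k] == c:
--             k += 1
--         if k > best:
--             best = k
--         rest = rest[k:]
--     return best
-- ===== Notes on version B (the rewrite author's own statement) =====
-- stated objective: alternative
-- what changed: Replaces A's per-row cnt/temp/current-char state machine over range(len(board)) with a run-skipping two-pointer scan over the extracted column: advance to the end of each block of equal characters and keep the maximum block length.
import Mathlib
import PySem

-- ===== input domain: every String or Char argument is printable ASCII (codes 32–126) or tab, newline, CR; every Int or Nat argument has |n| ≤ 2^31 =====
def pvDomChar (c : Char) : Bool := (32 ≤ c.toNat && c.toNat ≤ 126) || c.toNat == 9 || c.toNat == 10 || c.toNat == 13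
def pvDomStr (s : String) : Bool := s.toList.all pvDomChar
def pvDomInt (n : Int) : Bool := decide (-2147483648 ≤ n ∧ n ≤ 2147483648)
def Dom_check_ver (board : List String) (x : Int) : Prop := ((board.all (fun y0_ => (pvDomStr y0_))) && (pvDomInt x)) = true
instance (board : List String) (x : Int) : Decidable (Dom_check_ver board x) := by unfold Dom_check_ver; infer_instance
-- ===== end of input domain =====

-- B replaces A's cnt/temp/current-char state machine with a run-skipping two-pointer scan
-- over the extracted column (alternative decomposition, same cost).

-- ===== PORT A =====
-- board[i][x] as a total Lean value (the defaults are never reached under Pre_check_ver)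
def pvCell (board : List String) (i x : Int) : Char :=
  PySem.List.pyGetD (PySem.List.pyGetD board i "").toList x ' '

def check_ver (board : List String) (x : Int) : Int :=
  let c0 := pvCell board 0 x
  ((PySem.List.pyRange 0 (board.length : Int) 1).foldl
    (fun (s : Int × Int × Char) i =>
      let temp2 := if s.2.2 == pvCell board i x then s.2.1 + 1 else (1 : Int)
      let c2 := if s.2.2 == pvCell board i x then s.2.2 else pvCell board i x
      let cnt2 := if temp2 > s.1 then temp2 else s.1
      (cnt2, temp2, c2)) ((0 : Int), (0 : Int), c0)).1

-- ===== PORT B =====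
-- inner while loop of Source B: how many leading characters of t equal c (k = 1 + this)
def pvRunLen (c : Char) : List Char → Nat
  | [] => 0
  | d :: t => if d == c then pvRunLen c t + 1 else 0

-- outer while loop of Source B over rest = the remaining suffix of the column; the fuel
-- (initially the column length) bounds the number of iterations, which strictly shrink rest
def pvBRuns : Nat → List Char → Int → Int
  | 0, _, best => best
  | _ + 1, [], best => best
  | fuel + 1, c :: t, best =>
      let k : Int := 1 + (pvRunLen c t : Int)
      pvBRuns fuel (t.drop (pvRunLen c t)) (if k > best then k else best)

def check_ver_alt (board : List String) (x : Int) : Int :=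
  let col := board.map (fun row => PySem.List.pyGetD row.toList x ' ')
  pvBRuns col.length col 0

-- ===== PRECONDITION & SPEC =====
-- Pre_ excludes exactly the inputs where the Python A raises IndexError: an empty board,
-- or x not a valid Python index into some row.
def Pre_check_ver (board : List String) (x : Int) : Prop :=
  board ≠ [] ∧ ∀ s ∈ board, PySem.Raise.InRange s.toList.length x
instance (board : List String) (x : Int) : Decidable (Pre_check_ver board x) := by
  unfold Pre_check_ver; infer_instance
def pvWitness_check_ver : List String × Int := (["ab", "cb", "cb"], 1)

def Spec_check_ver (board : List String) (x : Int) (out : Int) : Prop := out = check_ver_alt board x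
instance (board : List String) (x : Int) (out : Int) : Decidable (Spec_check_ver board x out) := by unfold Spec_check_ver; infer_instance

-- ===== CLAIM (what is proved, stated in full; the proofs are below) =====
def Claim_equal_check_ver : Prop := ∀ (board : List String) (x : Int), Dom_check_ver board x → Pre_check_ver board x → Spec_check_ver board x (check_ver board x)

-- ===== LEMMAS AND PROOFS =====

-- A's loop restated as a recursion over the column characters
def pvALoop : List Char → Int → Int → Char → Int
  | [], cnt, _, _ => cnt
  | d :: t, cnt, temp, c =>
      let temp2 := if c == d then temp + 1 else 1
      let c2 := if c == d then c else d
      let cnt2 := if temp2 > cnt then temp2 else cnt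
      pvALoop t cnt2 temp2 c2

lemma foldl_eq_pvALoop (x : Int) (board : List String) : ∀ (cnt temp : Int) (c : Char),
    (board.foldl (fun (s : Int × Int × Char) row =>
      let d := PySem.List.pyGetD row.toList x ' '
      let temp2 := if s.2.2 == d then s.2.1 + 1 else (1 : Int)
      let c2 := if s.2.2 == d then s.2.2 else d
      let cnt2 := if temp2 > s.1 then temp2 else s.1
      (cnt2, temp2, c2)) (cnt, temp, c)).1
    = pvALoop (board.map (fun row => PySem.List.pyGetD row.toList x ' ')) cnt temp c := by
  induction board with
  | nil => intro cnt temp c; rfl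
  | cons r t ih => intro cnt temp c; simp only [List.foldl, List.map, pvALoop]; exact ih _ _ _

lemma head?_drop_pvRunLen (c : Char) (t : List Char) :
    (t.drop (pvRunLen c t)).head? ≠ some c := by
  induction t with
  | nil => simp
  | cons d t ih =>
    by_cases h : d = c
    · subst h
      simp only [pvRunLen, beq_self_eq_true, if_true, List.drop_succ_cons]
      exact ih
    · have hb : (d == c) = false := by simp [h]
      simp only [pvRunLen, hb, Bool.false_eq_true, if_false, List.drop_zero, List.head?_cons]
      intro hh
      exact h (Option.some_injective _ hh)

lemma pvALoop_run (t : List Char) : ∀ (c : Char) (cnt temp : Int), temp ≤ cnt →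
    pvALoop t cnt temp c
      = pvALoop (t.drop (pvRunLen c t)) (max cnt (temp + pvRunLen c t)) (temp + pvRunLen c t) c := by
  induction t with
  | nil =>
    intro c cnt temp h
    simp only [pvRunLen, List.drop_nil, pvALoop, Nat.cast_zero, add_zero]
    omega
  | cons d t ih =>
    intro c cnt temp h
    by_cases hd : c = d
    · subst hd
      simp only [pvALoop, pvRunLen, beq_self_eq_true, if_true, List.drop_succ_cons]
      have h1 : temp + 1 ≤ if temp + 1 > cnt then temp + 1 else cnt := by omega
      rw [ih c _ _ h1]
      have e1 : (max (if temp + 1 > cnt then temp + 1 else cnt) (temp + 1 + (pvRunLen c t : Int)))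
          = max cnt (temp + ((pvRunLen c t : Nat) + 1 : Nat)) := by push_cast; omega
      have e2 : temp + 1 + ((pvRunLen c t : Nat) : Int) = temp + (((pvRunLen c t : Nat) + 1 : Nat) : Int) := by
        push_cast; omega
      rw [e1, e2]
    · have hb : (c == d) = false := by simp [hd]
      have hb2 : (d == c) = false := by simp; intro hh; exact hd hh.symm
      simp only [pvRunLen, hb2, Bool.false_eq_true, if_false, List.drop_zero, Nat.cast_zero, add_zero]
      have e : max cnt temp = cnt := by omega
      rw [e]

lemma pvALoop_eq_pvBRuns : ∀ (n : Nat) (l : List Char) (best temp : Int) (c : Char),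
    l.length ≤ n → temp ≤ best → l.head? ≠ some c → pvALoop l best temp c = pvBRuns n l best := by
  intro n
  induction n with
  | zero =>
    intro l best temp c hlen _ _
    have : l = [] := by
      cases l with
      | nil => rfl
      | cons a t => simp at hlen
    subst this; rfl
  | succ n ih =>
    intro l best temp c hlen htemp hhead
    cases l with
    | nil => rfl
    | cons d t =>
      have hd : d ≠ c := by
        intro hh; subst hh; simp at hhead
      have hb : (c == d) = false := by simp; intro hh; exact hd hh.symm
      simp only [pvALoop, hb, Bool.false_eq_true, if_false]
      have h1 : (1 : Int) ≤ if (1 : Int) > best then 1 else best := by omega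
      rw [pvALoop_run t d _ 1 h1]
      have e1 : (max (if (1 : Int) > best then 1 else best) (1 + (pvRunLen d t : Int)))
          = max best (1 + (pvRunLen d t : Int)) := by
        have : (0 : Int) ≤ (pvRunLen d t : Int) := Int.natCast_nonneg _
        omega
      rw [e1]
      have hlen2 : (t.drop (pvRunLen d t)).length ≤ n := by
        simp only [List.length_drop]
        simp only [List.length_cons] at hlen
        omega
      rw [ih _ _ _ _ hlen2 (by have : (0 : Int) ≤ (pvRunLen d t : Int) := Int.natCast_nonneg _; omega)
        (head?_drop_pvRunLen d t)]
      simp only [pvBRuns]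
      congr 1
      have : (0 : Int) ≤ (pvRunLen d t : Int) := Int.natCast_nonneg _
      omega

lemma pvALoop_zero_eq_pvBRuns (l : List Char) (c : Char) :
    pvALoop l 0 0 c = pvBRuns l.length l 0 := by
  cases l with
  | nil => rfl
  | cons d t =>
    have hstate : pvALoop (d :: t) 0 0 c = pvALoop t 1 1 d := by
      by_cases hd : c = d
      · subst hd; simp [pvALoop]
      · have hb : (c == d) = false := by simp [hd]
        simp [pvALoop, hb]
    rw [hstate, pvALoop_run t d 1 1 le_rfl]
    have hnn : (0 : Int) ≤ (pvRunLen d t : Int) := Int.natCast_nonneg _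
    have e1 : max (1 : Int) (1 + (pvRunLen d t : Int)) = 1 + (pvRunLen d t : Int) := by omega
    rw [e1]
    have hlen2 : (t.drop (pvRunLen d t)).length ≤ t.length := by
      simp only [List.length_drop]; omega
    rw [pvALoop_eq_pvBRuns t.length _ _ _ d hlen2 (by omega) (head?_drop_pvRunLen d t)]
    simp only [List.length_cons, pvBRuns]
    congr 1
    omega

lemma check_ver_eq_pvALoop (board : List String) (x : Int) :
    check_ver board x
      = pvALoop (board.map (fun row => PySem.List.pyGetD row.toList x ' ')) 0 0 (pvCell board 0 x) := by
  show ((PySem.List.pyRange 0 (board.length : Int) 1).foldl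
      (fun (s : Int × Int × Char) i =>
        (fun (s : Int × Int × Char) (row : String) =>
          let d := PySem.List.pyGetD row.toList x ' '
          let temp2 := if s.2.2 == d then s.2.1 + 1 else (1 : Int)
          let c2 := if s.2.2 == d then s.2.2 else d
          let cnt2 := if temp2 > s.1 then temp2 else s.1
          (cnt2, temp2, c2)) s (PySem.List.pyGetD board i ""))
      ((0 : Int), (0 : Int), pvCell board 0 x)).1
    = _
  rw [PySem.List.foldl_pyRange_zero_pyGetD' board ""
    (fun (s : Int × Int × Char) (row : String) =>
      let d := PySem.List.pyGetD row.toList x ' '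
      let temp2 := if s.2.2 == d then s.2.1 + 1 else (1 : Int)
      let c2 := if s.2.2 == d then s.2.2 else d
      let cnt2 := if temp2 > s.1 then temp2 else s.1
      (cnt2, temp2, c2)) ((0 : Int), (0 : Int), pvCell board 0 x)]
  exact foldl_eq_pvALoop x board 0 0 _

-- ===== VERDICT (by name: the statement is the Claim_ definition above) =====
theorem check_ver_spec : Claim_equal_check_ver := by
  intro board x _ _
  unfold Spec_check_ver check_ver_alt
  rw [check_ver_eq_pvALoop]
  simpa using pvALoop_zero_eq_pvBRuns (board.map (fun row => PySem.List.pyGetD row.toList x ' ')) (pvCell board 0 x)
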